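-- pv_equiv track=rewrite | github.com/prozentia/kairos-trading | core/indicators/supertrend.py | _prev_valid_int
-- ===== SOURCE A (Python) =====
-- def _prev_valid_int(values: list[int | None]) -> int | None:
--     found = False
--     for v in reversed(values):
--         if v is not None:
--             if found:
--                 return v
--             found = True
--     return None
-- ===== SOURCE B (Python) =====
-- def _prev_valid_int(values):
--     valid = [v for v in values if v is not None]
--     return valid[-2] if len(valid) >= 2 else None
-- ===== Notes on version B (the rewrite author's own statement) =====
-- stated objective: simpler
-- what changed: Replaces A's reversed streaming scan with a found-flag and early return by materializing the filtered list of non-None values once and taking its second-from-last element by negative index.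
import Mathlib
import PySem

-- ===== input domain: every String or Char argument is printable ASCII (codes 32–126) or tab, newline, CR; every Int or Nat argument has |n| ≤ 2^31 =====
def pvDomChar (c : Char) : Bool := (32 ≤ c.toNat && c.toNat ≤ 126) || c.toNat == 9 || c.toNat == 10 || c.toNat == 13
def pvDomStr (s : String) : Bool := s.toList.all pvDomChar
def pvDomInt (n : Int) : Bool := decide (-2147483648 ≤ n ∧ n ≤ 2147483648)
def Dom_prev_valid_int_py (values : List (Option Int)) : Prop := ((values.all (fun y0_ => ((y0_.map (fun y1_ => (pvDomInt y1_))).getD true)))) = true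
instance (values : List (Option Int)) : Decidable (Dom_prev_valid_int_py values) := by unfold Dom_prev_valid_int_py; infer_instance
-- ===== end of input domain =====

-- B replaces A's reversed streaming scan with a found-flag by filtering the non-None
-- values once and indexing the second-from-last (objective: simpler).


-- ===== PORT A =====
-- the for-loop over reversed(values) with its found-flag and early return
def prevValidLoop : List (Option Int) → Bool → Option Int
  | [], _ => none
  | v :: rest, found =>
    match v with
    | some x => if found then some x else prevValidLoop rest true
    | none => prevValidLoop rest found

def prev_valid_int_py (values : List (Option Int)) : Option Int :=
  prevValidLoop values.reverse false

-- ===== PORT B =====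
def prev_valid_int_py_alt (values : List (Option Int)) : Option Int :=
  let valid := values.filterMap id
  if 2 ≤ valid.length then PySem.List.pyGet? valid (-2) else none

-- ===== PRECONDITION & SPEC =====
def Spec_prev_valid_int_py (values : List (Option Int)) (out : Option Int) : Prop := out = prev_valid_int_py_alt values
instance (values : List (Option Int)) (out : Option Int) : Decidable (Spec_prev_valid_int_py values out) := by unfold Spec_prev_valid_int_py; infer_instance

-- ===== CLAIM (what is proved, stated in full; the proofs are below) =====
def Claim_equal_prev_valid_int_py : Prop := ∀ (values : List (Option Int)), Dom_prev_valid_int_py values → Spec_prev_valid_int_py values (prev_valid_int_py values)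

-- ===== LEMMAS AND PROOFS =====

-- the loop with found = true returns the first non-None, with found = false the second
theorem prevValidLoop_eq (l : List (Option Int)) :
    prevValidLoop l true = (l.filterMap id)[0]? ∧
    prevValidLoop l false = (l.filterMap id)[1]? := by
  induction l with
  | nil => simp [prevValidLoop]
  | cons v rest ih =>
    cases v with
    | none => simpa [prevValidLoop] using ih
    | some x => simp [prevValidLoop, ih.1]

-- ===== VERDICT (by name: the statement is the Claim_ definition above) =====
theorem prev_valid_int_py_spec : Claim_equal_prev_valid_int_py := by
  intro values _
  unfold Spec_prev_valid_int_py prev_valid_int_py prev_valid_int_py_alt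
  rw [(prevValidLoop_eq values.reverse).2, List.filterMap_reverse]
  set valid := values.filterMap id with hv
  by_cases h : 2 ≤ valid.length
  · rw [if_pos h, List.getElem?_reverse (by omega),
      PySem.List.pyGet?_neg_ofNat valid 2 (by omega) h]
    have h2 : valid.length - 1 - 1 = valid.length - 2 := by omega
    rw [h2]
  · rw [if_neg h, List.getElem?_eq_none (by simp; omega)]
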